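-- pv_equiv track=rewrite | github.com/AliKhanat88/codeforces | new_2024/strinProblem.py | count_valid_substrings
-- ===== SOURCE A (Python) =====
-- def count_valid_substrings(s):
--     n = len(s)
--     seti = set()
--
--     # Iterate over all possible substrings t
--     for start in range(n):
--         for end in range(start + 1, n + 1):
--             t = s[start:end]
--             if t == "a":  # Skip "a" as t
--                 continue
--
--             # Check if s can be partitioned into t and "a"
--             i = 0
--             has_t = False
--             valid = True
--             while i < n:
--                 if s[i:i+len(t)] == t:  # Match substring t
--                     has_t = True
--                     i += len(t)
--                 elif s[i] == "a":  # Match "a"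
--                     i += 1
--                 else:  # Invalid partition
--                     valid = False
--                     break
--
--             # If valid partition and at least one t exists
--             if valid and has_t:
--                 seti.add(s[start:end])
--                 # count += 1
--
--     return len(seti)
-- ===== SOURCE B (Python) =====
-- def _greedy_partition(s, n, t):
--     # greedy: consume t whenever it matches, otherwise a single 'a'
--     L = len(t)
--     i = 0
--     has_t = False
--     while i < n:
--         if s[i:i+L] == t:
--             has_t = True
--             i += L
--         elif s[i] == 'a':
--             i += 1
--         else:
--             return False
--     return has_t
--
--
-- def count_valid_substrings(s):
--     # Only substrings whose window covers the first non-'a' position can be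
--     # consumed by the greedy partition; if s is all 'a', every valid t is a
--     # block a^k, i.e. a prefix.  So the candidate set shrinks drastically.
--     n = len(s)
--     p = 0
--     while p < n and s[p] == 'a':
--         p += 1
--     if p == n:
--         p = 0
--     found = set()
--     for end in range(p + 1, n + 1):
--         for start in range(p + 1):
--             t = s[start:end]
--             if t == "a" or t in found:
--                 continue
--             if _greedy_partition(s, n, t):
--                 found.add(t)
--     return len(found)
-- ===== Notes on version B (the rewrite author's own statement) =====
-- stated objective: faster
-- what changed: Instead of testing every substring, B locates the first non-'a' position p and only tests the substrings whose window covers p (prefixes when s is all 'a') -- any other candidate fails the greedy partition -- and skips duplicates before re-checking.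
import Mathlib
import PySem

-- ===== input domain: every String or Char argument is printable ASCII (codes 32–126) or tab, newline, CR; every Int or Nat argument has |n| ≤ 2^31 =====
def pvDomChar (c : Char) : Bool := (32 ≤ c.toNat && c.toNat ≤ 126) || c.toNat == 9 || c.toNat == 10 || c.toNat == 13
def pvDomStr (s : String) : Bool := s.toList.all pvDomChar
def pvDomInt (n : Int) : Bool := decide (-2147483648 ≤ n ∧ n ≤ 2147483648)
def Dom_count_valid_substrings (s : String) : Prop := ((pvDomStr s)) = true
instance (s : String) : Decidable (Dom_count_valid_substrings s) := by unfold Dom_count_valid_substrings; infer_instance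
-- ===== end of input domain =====

-- B restricts candidate substrings to windows covering the first non-'a' position
-- (prefixes when s is all 'a') and skips duplicates before re-checking: faster.


-- ===== PORT A =====
-- the inner `while i < n` loop of A; fuel = number of remaining iterations
-- (n+1 at the call site is enough: i grows by ≥ 1 each iteration since t ≠ "");
-- returns (valid, has_t)
def pvLoopA (cs t : List Char) (fuel i : Nat) (hasT : Bool) : Bool × Bool :=
  match fuel with
  | 0 => (true, hasT)
  | f + 1 =>
    if i < cs.length then
      if PySem.List.slice cs (some (i : Int)) (some ((i + t.length : Nat) : Int)) == t then
        pvLoopA cs t f (i + t.length) true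
      else if PySem.List.pyGet? cs (i : Int) == some 'a' then
        pvLoopA cs t f (i + 1) hasT
      else (false, hasT)
    else (true, hasT)

def count_valid_substrings (s : String) : Int :=
  let cs := s.toList
  let n := cs.length
  let seti : PySem.Set (List Char) :=
    (List.range n).foldl (fun st (start : Nat) =>
      (List.range' (start + 1) (n - start)).foldl (fun st (e : Nat) =>
        let t := PySem.List.slice cs (some (start : Int)) (some (e : Int))
        if t == ['a'] then st
        else
          let r := pvLoopA cs t (n + 1) 0 false
          if r.1 && r.2 then PySem.Set.add st t else st) st)
      PySem.Set.empty
  PySem.Set.len seti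

-- ===== PORT B =====
-- index of the first non-'a' character (= length if none), B's initial while loop
def pvFirstNonA : List Char → Nat
  | [] => 0
  | c :: rest => if c == 'a' then pvFirstNonA rest + 1 else 0

-- s[i:i+len(t)] == t
def pvMatchesAt (cs t : List Char) (i : Nat) : Bool :=
  PySem.List.slice cs (some (i : Int)) (some ((i + t.length : Nat) : Int)) == t

-- B's helper _greedy_partition; fuel as in pvLoopA
def pvGreedy (cs t : List Char) (fuel i : Nat) (hasT : Bool) : Bool :=
  match fuel with
  | 0 => hasT
  | f + 1 =>
    if i < cs.length then
      if pvMatchesAt cs t i then pvGreedy cs t f (i + t.length) true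
      else if PySem.List.pyGet? cs (i : Int) == some 'a' then pvGreedy cs t f (i + 1) hasT
      else false
    else hasT

def count_valid_substrings_alt (s : String) : Int :=
  let cs := s.toList
  let n := cs.length
  let p0 := pvFirstNonA cs
  let p := if p0 = n then 0 else p0
  let found : PySem.Set (List Char) :=
    (List.range' (p + 1) (n - p)).foldl (fun st (e : Nat) =>
      (List.range (p + 1)).foldl (fun st (start : Nat) =>
        let t := PySem.List.slice cs (some (start : Int)) (some (e : Int))
        if t == ['a'] || PySem.Set.contains st t then st
        else if pvGreedy cs t (n + 1) 0 false then PySem.Set.add st t else st) st)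
      PySem.Set.empty
  PySem.Set.len found

-- ===== PRECONDITION & SPEC =====
def Spec_count_valid_substrings (s : String) (out : Int) : Prop := out = count_valid_substrings_alt s
instance (s : String) (out : Int) : Decidable (Spec_count_valid_substrings s out) := by unfold Spec_count_valid_substrings; infer_instance

-- ===== CLAIM (what is proved, stated in full; the proofs are below) =====
def Claim_equal_count_valid_substrings : Prop := ∀ (s : String), Dom_count_valid_substrings s → Spec_count_valid_substrings s (count_valid_substrings s)

-- ===== LEMMAS AND PROOFS =====

-- Python slice s[a:b] with Nat bounds, as drop/take
def pvSl (cs : List Char) (a b : Nat) : List Char := (cs.drop a).take (b - a)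

theorem pv_slice_eq (cs : List Char) (a b : Nat) :
    PySem.List.slice cs (some (a : Int)) (some (b : Int)) = pvSl cs a b := by
  simp [pvSl, PySem.List.slice_natCast]

theorem pv_length_pvSl (cs : List Char) (a b : Nat) :
    (pvSl cs a b).length = min (b - a) (cs.length - a) := by
  simp [pvSl]

-- B's p: the first non-'a' index, 0 when s is all 'a'
def pvP (cs : List Char) : Nat :=
  if pvFirstNonA cs = cs.length then 0 else pvFirstNonA cs

-- the common validity predicate: the greedy partition succeeds and uses t
def pvOk (cs t : List Char) : Bool := pvGreedy cs t (cs.length + 1) 0 false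

-- B's Bool-valued loop computes valid && has_t of A's pair-valued loop
theorem pv_greedy_eq_loopA (cs t : List Char) :
    ∀ (f i : Nat) (hT : Bool),
      pvGreedy cs t f i hT = ((pvLoopA cs t f i hT).1 && (pvLoopA cs t f i hT).2) := by
  intro f
  induction f with
  | zero => intro i hT; simp [pvGreedy, pvLoopA]
  | succ f ih =>
    intro i hT
    simp only [pvGreedy, pvLoopA, pvMatchesAt]
    split_ifs <;> simp [ih]

-- the two fold bodies, named
def pvSetA (cs : List Char) : PySem.Set (List Char) :=
  (List.range cs.length).foldl (fun st (start : Nat) =>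
    (List.range' (start + 1) (cs.length - start)).foldl (fun st (e : Nat) =>
      let t := PySem.List.slice cs (some (start : Int)) (some (e : Int))
      if t == ['a'] then st
      else
        let r := pvLoopA cs t (cs.length + 1) 0 false
        if r.1 && r.2 then PySem.Set.add st t else st) st)
    PySem.Set.empty

def pvSetB (cs : List Char) : PySem.Set (List Char) :=
  let p0 := pvFirstNonA cs
  let p := if p0 = cs.length then 0 else p0
  (List.range' (p + 1) (cs.length - p)).foldl (fun st (e : Nat) =>
    (List.range (p + 1)).foldl (fun st (start : Nat) =>
      let t := PySem.List.slice cs (some (start : Int)) (some (e : Int))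
      if t == ['a'] || PySem.Set.contains st t then st
      else if pvGreedy cs t (cs.length + 1) 0 false then PySem.Set.add st t else st) st)
    PySem.Set.empty

theorem pv_countA_eq (s : String) :
    count_valid_substrings s = PySem.Set.len (pvSetA s.toList) := rfl

theorem pv_countB_eq (s : String) :
    count_valid_substrings_alt s = PySem.Set.len (pvSetB s.toList) := rfl

-- generic fold lemmas
theorem pv_mem_foldl {α : Type} (g : PySem.Set (List Char) → α → PySem.Set (List Char))
    (Q : α → List Char → Prop)
    (hg : ∀ st x t, t ∈ g st x ↔ t ∈ st ∨ Q x t) :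
    ∀ (l : List α) (st : PySem.Set (List Char)) (t : List Char),
      t ∈ l.foldl g st ↔ t ∈ st ∨ ∃ x ∈ l, Q x t := by
  intro l
  induction l with
  | nil => intro st t; simp
  | cons x l ih =>
    intro st t
    simp only [List.foldl_cons, ih, hg, List.mem_cons]
    constructor
    · rintro ((h | h) | ⟨y, hy, hQ⟩)
      · exact Or.inl h
      · exact Or.inr ⟨x, Or.inl rfl, h⟩
      · exact Or.inr ⟨y, Or.inr hy, hQ⟩
    · rintro (h | ⟨y, (rfl | hy), hQ⟩)
      · exact Or.inl (Or.inl h)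
      · exact Or.inl (Or.inr hQ)
      · exact Or.inr ⟨y, hy, hQ⟩

theorem pv_nodup_foldl {α : Type} (g : PySem.Set (List Char) → α → PySem.Set (List Char))
    (hg : ∀ st x, st.Nodup → (g st x).Nodup) :
    ∀ (l : List α) (st : PySem.Set (List Char)), st.Nodup → (l.foldl g st).Nodup := by
  intro l
  induction l with
  | nil => intro st h; simpa using h
  | cons x l ih => intro st h; exact ih _ (hg _ _ h)

-- membership through A's inner step
theorem pv_step_memA {α : Type} (f : α → List Char) (c : α → Bool)
    (st : PySem.Set (List Char)) (t : List Char) (x : α) :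
    (t ∈ if f x == ['a'] then st
         else if c x then PySem.Set.add st (f x) else st)
      ↔ t ∈ st ∨ (f x ≠ ['a'] ∧ c x = true ∧ f x = t) := by
  split_ifs with h1 h2
  · simp only [beq_iff_eq] at h1
    simp [h1]
  · simp only [beq_iff_eq] at h1
    simp [PySem.Set.mem_add, h1, h2]
    tauto
  · simp only [beq_iff_eq] at h1
    simp only [Bool.not_eq_true] at h2
    simp [h1, h2]

-- membership through B's inner step (the duplicate skip does not change membership)
theorem pv_step_memB {α : Type} (f : α → List Char) (c : α → Bool)
    (st : PySem.Set (List Char)) (t : List Char) (x : α) :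
    (t ∈ if f x == ['a'] || PySem.Set.contains st (f x) then st
         else if c x then PySem.Set.add st (f x) else st)
      ↔ t ∈ st ∨ (f x ≠ ['a'] ∧ c x = true ∧ f x = t) := by
  split_ifs with h1 h2
  · simp only [Bool.or_eq_true, beq_iff_eq, PySem.Set.contains_iff] at h1
    constructor
    · exact fun h => Or.inl h
    · rintro (h | ⟨hne, -, heq⟩)
      · exact h
      · rcases h1 with h1 | h1
        · exact absurd h1 hne
        · exact heq ▸ h1
  · simp only [Bool.or_eq_true, beq_iff_eq, PySem.Set.contains_iff, not_or] at h1
    simp [PySem.Set.mem_add, h1.1, h2]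
    tauto
  · simp only [Bool.or_eq_true, beq_iff_eq, PySem.Set.contains_iff, not_or] at h1
    simp only [Bool.not_eq_true] at h2
    simp [h1.1, h2]

-- pvFirstNonA facts
theorem pv_firstNonA_le (cs : List Char) : pvFirstNonA cs ≤ cs.length := by
  induction cs with
  | nil => simp [pvFirstNonA]
  | cons c rest ih =>
    by_cases hc : c == 'a'
    · simp only [pvFirstNonA, if_pos hc, List.length_cons]; omega
    · simp only [pvFirstNonA, if_neg hc, List.length_cons]; omega

theorem pv_firstNonA_all (cs : List Char) (h : pvFirstNonA cs = cs.length) :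
    ∀ c ∈ cs, c = 'a' := by
  induction cs with
  | nil => simp
  | cons c rest ih =>
    by_cases hc : c == 'a'
    · simp only [pvFirstNonA, if_pos hc, List.length_cons] at h
      simp only [beq_iff_eq] at hc
      intro x hx
      rcases List.mem_cons.mp hx with rfl | hx
      · exact hc
      · exact ih (by omega) x hx
    · simp only [pvFirstNonA, if_neg hc, List.length_cons] at h
      omega

theorem pv_firstNonA_get (cs : List Char) (h : pvFirstNonA cs < cs.length) :
    cs[pvFirstNonA cs]? ≠ some 'a' := by
  induction cs with
  | nil => simp [pvFirstNonA] at h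
  | cons c rest ih =>
    by_cases hc : c == 'a'
    · simp only [pvFirstNonA, if_pos hc, List.length_cons] at h ⊢
      simpa using ih (by omega)
    · simp only [pvFirstNonA, if_neg hc] at h ⊢
      simp only [beq_iff_eq] at hc
      simpa using hc

-- characterization of A's set
theorem pv_memA (cs t : List Char) :
    t ∈ pvSetA cs ↔
      ∃ a b : Nat, a < b ∧ b ≤ cs.length ∧ pvSl cs a b = t ∧ t ≠ ['a'] ∧ pvOk cs t = true := by
  rw [pvSetA]
  rw [pv_mem_foldl _
    (fun start t => ∃ e ∈ List.range' (start + 1) (cs.length - start),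
        pvSl cs start e ≠ ['a'] ∧
        ((pvLoopA cs (pvSl cs start e) (cs.length + 1) 0 false).1 &&
         (pvLoopA cs (pvSl cs start e) (cs.length + 1) 0 false).2) = true ∧
        pvSl cs start e = t)
    (fun st start u => by
      rw [pv_mem_foldl _
        (fun e u => pvSl cs start e ≠ ['a'] ∧
          ((pvLoopA cs (pvSl cs start e) (cs.length + 1) 0 false).1 &&
           (pvLoopA cs (pvSl cs start e) (cs.length + 1) 0 false).2) = true ∧
          pvSl cs start e = u)
        (fun st e u => by
          simpa only [pv_slice_eq] using
            pv_step_memA (fun e => pvSl cs start e)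
              (fun e => ((pvLoopA cs (pvSl cs start e) (cs.length + 1) 0 false).1 &&
                         (pvLoopA cs (pvSl cs start e) (cs.length + 1) 0 false).2)) st u e)])]
  simp only [PySem.Set.empty, List.not_mem_nil, false_or, List.mem_range, List.mem_range'_1]
  constructor
  · rintro ⟨a, ha, e, ⟨hae, hen⟩, hne, hok, rfl⟩
    refine ⟨a, e, by omega, by omega, rfl, hne, ?_⟩
    rw [pvOk, pv_greedy_eq_loopA]; exact hok
  · rintro ⟨a, b, hab, hbn, rfl, hne, hok⟩
    refine ⟨a, by omega, b, ⟨by omega, by omega⟩, hne, ?_, rfl⟩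
    rw [pvOk, pv_greedy_eq_loopA] at hok; exact hok

-- characterization of B's set (p as in the port)
theorem pv_memB (cs t : List Char) :
    t ∈ pvSetB cs ↔
      ∃ a e : Nat, a ≤ pvP cs ∧ pvP cs + 1 ≤ e ∧ e ≤ cs.length ∧
        pvSl cs a e = t ∧ t ≠ ['a'] ∧ pvOk cs t = true := by
  rw [pvSetB, ← pvP]
  set p := pvP cs with hp
  rw [pv_mem_foldl _
    (fun e t => ∃ a ∈ List.range (p + 1),
        pvSl cs a e ≠ ['a'] ∧ pvGreedy cs (pvSl cs a e) (cs.length + 1) 0 false = true ∧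
        pvSl cs a e = t)
    (fun st e u => by
      rw [pv_mem_foldl _
        (fun a u => pvSl cs a e ≠ ['a'] ∧
          pvGreedy cs (pvSl cs a e) (cs.length + 1) 0 false = true ∧ pvSl cs a e = u)
        (fun st a u => by
          simpa only [pv_slice_eq] using
            pv_step_memB (fun a => pvSl cs a e)
              (fun a => pvGreedy cs (pvSl cs a e) (cs.length + 1) 0 false) st u a)])]
  simp only [PySem.Set.empty, List.not_mem_nil, false_or, List.mem_range, List.mem_range'_1]
  constructor
  · rintro ⟨e, ⟨hpe, hen⟩, a, hap, hne, hok, rfl⟩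
    have hple : p ≤ cs.length := by
      rw [hp, pvP]
      split_ifs with h
      · omega
      · exact pv_firstNonA_le cs
    exact ⟨a, e, by omega, hpe, by omega, rfl, hne, hok⟩
  · rintro ⟨a, e, hap, hpe, hen, rfl, hne, hok⟩
    exact ⟨e, ⟨hpe, by omega⟩, a, by omega, hne, hok, rfl⟩

-- nodup of both sets
theorem pv_nodupA (cs : List Char) : (pvSetA cs).Nodup := by
  rw [pvSetA]
  refine pv_nodup_foldl _ (fun st start h => ?_) _ _ (by simp [PySem.Set.empty])
  refine pv_nodup_foldl _ (fun st e h => ?_) _ _ h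
  simp only
  split_ifs with h1 h2 <;> first | exact h | exact PySem.Set.nodup_add _ _ h

theorem pv_nodupB (cs : List Char) : (pvSetB cs).Nodup := by
  rw [pvSetB]
  refine pv_nodup_foldl _ (fun st e h => ?_) _ _ (by simp [PySem.Set.empty])
  refine pv_nodup_foldl _ (fun st a h => ?_) _ _ h
  simp only
  split_ifs with h1 h2 <;> first | exact h | exact PySem.Set.nodup_add _ _ h

-- slices of an all-'a' string are determined by their length
theorem pv_sl_all_a (cs : List Char) (h : ∀ c ∈ cs, c = 'a') (a b : Nat)
    (hab : a ≤ b) (hb : b ≤ cs.length) :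
    pvSl cs a b = List.replicate (b - a) 'a' := by
  have hcs : cs = List.replicate cs.length 'a' :=
    List.eq_replicate_length.mpr h
  rw [pvSl, hcs, List.drop_replicate, List.take_replicate]
  congr 1
  omega

-- core completeness: a valid t matches at a window covering position p (cs[p] ≠ 'a')
theorem pv_loopA_covers (cs t : List Char) (ht : t ≠ []) (p : Nat)
    (hpn : p < cs.length) (hc : cs[p]? ≠ some 'a') :
    ∀ (f i : Nat) (hT : Bool), cs.length - i ≤ f → i ≤ p →
      (pvLoopA cs t f i hT).1 = true →
      ∃ i0, i ≤ i0 ∧ i0 ≤ p ∧ p < i0 + t.length ∧ pvSl cs i0 (i0 + t.length) = t := by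
  intro f
  induction f with
  | zero => intro i hT hf hip _; omega
  | succ f ih =>
    intro i hT hf hip hval
    have hin : i < cs.length := by omega
    rw [pvLoopA] at hval
    rw [if_pos hin] at hval
    by_cases hm : PySem.List.slice cs (some (i : Int)) (some ((i + t.length : Nat) : Int)) == t
    · rw [if_pos hm] at hval
      have hsl : pvSl cs i (i + t.length) = t := by
        rw [← pv_slice_eq]; exact beq_iff_eq.mp hm
      have hLpos : 0 < t.length := List.length_pos_of_ne_nil ht
      have hlen : t.length ≤ cs.length - i := by
        have := pv_length_pvSl cs i (i + t.length)
        rw [hsl] at this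
        omega
      by_cases hcov : p < i + t.length
      · exact ⟨i, le_refl i, hip, hcov, hsl⟩
      · have : i + t.length ≤ p := by omega
        obtain ⟨i0, h1, h2, h3, h4⟩ := ih (i + t.length) true (by omega) (by omega) hval
        exact ⟨i0, by omega, h2, h3, h4⟩
    · rw [if_neg hm] at hval
      by_cases ha : PySem.List.pyGet? cs (i : Int) == some 'a'
      · rw [if_pos ha] at hval
        have hia : cs[i]? = some 'a' := by
          have := beq_iff_eq.mp ha
          rwa [PySem.List.pyGet?_natCast] at this
        have hip' : i ≠ p := fun h => hc (h ▸ hia)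
        obtain ⟨i0, h1, h2, h3, h4⟩ := ih (i + 1) hT (by omega) (by omega) hval
        exact ⟨i0, by omega, h2, h3, h4⟩
      · rw [if_neg ha] at hval
        simp at hval

-- the candidate sets coincide
theorem pv_cand_iff (cs t : List Char) :
    (∃ a b : Nat, a < b ∧ b ≤ cs.length ∧ pvSl cs a b = t ∧ t ≠ ['a'] ∧ pvOk cs t = true) ↔
    (∃ a e : Nat, a ≤ pvP cs ∧ pvP cs + 1 ≤ e ∧ e ≤ cs.length ∧
       pvSl cs a e = t ∧ t ≠ ['a'] ∧ pvOk cs t = true) := by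
  by_cases h : pvFirstNonA cs = cs.length
  · -- all characters are 'a'
    have hall := pv_firstNonA_all cs h
    have hp0 : pvP cs = 0 := by rw [pvP, if_pos h]
    rw [hp0]
    constructor
    · rintro ⟨a, b, hab, hbn, rfl, hne, hok⟩
      refine ⟨0, b - a, by omega, by omega, by omega, ?_, hne, hok⟩
      rw [pv_sl_all_a cs hall a b (by omega) hbn,
          pv_sl_all_a cs hall 0 (b - a) (by omega) (by omega)]
      simp
    · rintro ⟨a, e, ha, he1, hen, rfl, hne, hok⟩
      exact ⟨a, e, by omega, hen, rfl, hne, hok⟩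
  · -- p is the first non-'a' position
    have hple : pvFirstNonA cs ≤ cs.length := pv_firstNonA_le cs
    have hplt : pvFirstNonA cs < cs.length := by omega
    have hget := pv_firstNonA_get cs hplt
    have hp0 : pvP cs = pvFirstNonA cs := by rw [pvP, if_neg h]
    rw [hp0]
    set p := pvFirstNonA cs with hp
    constructor
    · rintro ⟨a, b, hab, hbn, hsl, hne, hok⟩
      have htne : t ≠ [] := by
        intro hnil
        have := pv_length_pvSl cs a b
        rw [hsl, hnil] at this
        simp at this
        omega
      have hval : (pvLoopA cs t (cs.length + 1) 0 false).1 = true := by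
        rw [pvOk, pv_greedy_eq_loopA] at hok
        exact (Bool.and_eq_true_iff.mp hok).1
      obtain ⟨i0, -, hi0p, hcov, hsl0⟩ :=
        pv_loopA_covers cs t htne p hplt hget (cs.length + 1) 0 false (by omega) (by omega) hval
      have hlen : t.length ≤ cs.length - i0 := by
        have := pv_length_pvSl cs i0 (i0 + t.length)
        rw [hsl0] at this
        omega
      exact ⟨i0, i0 + t.length, hi0p, hcov, by omega, hsl0, hne, hok⟩
    · rintro ⟨a, e, hap, hpe, hen, hsl, hne, hok⟩
      exact ⟨a, e, by omega, hen, hsl, hne, hok⟩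

-- ===== VERDICT (by name: the statement is the Claim_ definition above) =====
theorem count_valid_substrings_spec : Claim_equal_count_valid_substrings := by
  intro s _
  show count_valid_substrings s = count_valid_substrings_alt s
  rw [pv_countA_eq, pv_countB_eq]
  have hperm : (pvSetA s.toList).Perm (pvSetB s.toList) := by
    rw [List.perm_ext_iff_of_nodup (pv_nodupA _) (pv_nodupB _)]
    intro t
    rw [pv_memA, pv_memB]
    exact pv_cand_iff s.toList t
  simp [PySem.Set.len, hperm.length_eq]
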